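-- pv_equiv track=rewrite | github.com/Otasmacour/Graphs | Grafy/OtherFunctions.py | NextDecimalNumber
-- ===== SOURCE A (Python) =====
-- def NextDecimalNumber(string):
--     result = 0
--     index = 0
--     while(not 48<=ord(string[index])<=57):
--         index += 1
--     while(index < len(string) and 48<=ord(string[index])<=57):
--         result = result*10 + ord(string[index]) - 48
--         index += 1
--     return result, string[index+1:len(string)]
-- ===== SOURCE B (Python) =====
-- import re
--
-- def NextDecimalNumber(string):
--     m = re.search(r'[0-9]+', string)
--     return int(m.group()), string[m.end() + 1:]
-- ===== Notes on version B (the rewrite author's own statement) =====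
-- stated objective: idiomatic
-- what changed: Replaces the two hand-written while-loops (skip to first digit, accumulate digits by ord arithmetic) with a single re.search for the first run of ASCII digits, int() on the match and a slice from match.end()+1; the digit-free case stays excluded by Pre_ (A raises IndexError, B raises AttributeError there).
import Mathlib
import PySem

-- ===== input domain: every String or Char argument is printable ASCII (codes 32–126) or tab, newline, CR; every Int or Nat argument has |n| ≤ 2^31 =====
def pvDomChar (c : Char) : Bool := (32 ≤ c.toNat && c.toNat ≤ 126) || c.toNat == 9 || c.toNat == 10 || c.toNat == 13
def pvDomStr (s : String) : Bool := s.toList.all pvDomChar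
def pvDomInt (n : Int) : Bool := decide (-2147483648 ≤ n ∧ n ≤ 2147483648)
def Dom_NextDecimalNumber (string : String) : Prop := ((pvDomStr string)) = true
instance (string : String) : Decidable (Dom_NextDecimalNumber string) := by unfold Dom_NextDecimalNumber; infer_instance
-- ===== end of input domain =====

-- B replaces A's two hand-written while-loops by an idiomatic regex search for the
-- first run of ASCII digits ([0-9]+), int() on the match, and a slice from end()+1.
-- Equivalence is proved on Pre_: strings containing at least one ASCII digit
-- (on digit-free strings both Pythons raise: A IndexError, B AttributeError).

-- shared digit test: A's `48 <= ord(c) <= 57` and B's regex class `[0-9]` denote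
-- exactly this set of characters
def pvIsDig (c : Char) : Bool := 48 ≤ c.toNat && c.toNat ≤ 57

-- ===== PORT A =====
-- first while-loop: advance index until a digit; if index runs past the end,
-- Python's string[index] raises IndexError (excluded by Pre_), here we stop at cs.length
def pvSkipA (cs : List Char) (i : Nat) : Nat :=
  if h : i < cs.length then
    if pvIsDig cs[i] then i else pvSkipA cs (i + 1)
  else i
termination_by cs.length - i

-- second while-loop: accumulate result = result*10 + ord(c) - 48 while digits last
def pvAccA (cs : List Char) (i : Nat) (result : Int) : Int × Nat :=
  if h : i < cs.length then
    if pvIsDig cs[i] then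
      pvAccA cs (i + 1) (result * 10 + ((cs[i].toNat : Int) - 48))
    else (result, i)
  else (result, i)
termination_by cs.length - i

def NextDecimalNumber (string : String) : Int × String :=
  let cs := string.toList
  let index := pvSkipA cs 0
  let ri := pvAccA cs index 0
  -- string[index+1:len(string)] with nonnegative start: exact as drop (index+1)
  (ri.1, String.ofList (cs.drop (ri.2 + 1)))

-- ===== PORT B =====
-- re.search(r'[0-9]+', string): the match starts after the longest digit-free
-- prefix and consists of the maximal digit run there; int(m.group()) evaluates the
-- digit string; string[m.end()+1:] is the tail
def NextDecimalNumber_alt (string : String) : Int × String :=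
  let cs := string.toList
  let before := cs.takeWhile (fun c => !pvIsDig c)   -- text before the match
  let rest := cs.drop before.length
  let digits := rest.takeWhile pvIsDig               -- m.group()
  let value := digits.foldl (fun a c => a * 10 + ((c.toNat : Int) - 48)) 0   -- int(m.group())
  (value, String.ofList ((rest.drop digits.length).drop 1))   -- string[m.end()+1:]

-- ===== PRECONDITION & SPEC =====
-- Pre_ excludes exactly the digit-free strings, on which Python A raises IndexError
-- (and Python B raises AttributeError).
def Pre_NextDecimalNumber (string : String) : Prop :=
  string.toList.any pvIsDig = true
instance (string : String) : Decidable (Pre_NextDecimalNumber string) := by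
  unfold Pre_NextDecimalNumber; infer_instance

def pvWitness_NextDecimalNumber : String := "a12b"

def Spec_NextDecimalNumber (string : String) (out : Int × String) : Prop := out = NextDecimalNumber_alt string
instance (string : String) (out : Int × String) : Decidable (Spec_NextDecimalNumber string out) := by unfold Spec_NextDecimalNumber; infer_instance

-- ===== CLAIM (what is proved, stated in full; the proofs are below) =====
def Claim_equal_NextDecimalNumber : Prop := ∀ (string : String), Dom_NextDecimalNumber string → Pre_NextDecimalNumber string → Spec_NextDecimalNumber string (NextDecimalNumber string)

-- ===== LEMMAS AND PROOFS =====

-- A's skip loop lands exactly after the longest digit-free prefix, provided a digit exists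
theorem pvSkipA_eq (cs : List Char) (i : Nat) (hle : i ≤ cs.length)
    (hany : (cs.drop i).any pvIsDig = true) :
    pvSkipA cs i = i + ((cs.drop i).takeWhile (fun c => !pvIsDig c)).length := by
  by_cases h : i < cs.length
  · rw [List.drop_eq_getElem_cons h]
    by_cases hd : pvIsDig cs[i] = true
    · rw [pvSkipA, dif_pos h, if_pos hd]
      simp [hd]
    · have hdf : pvIsDig cs[i] = false := by simpa using hd
      have hany' : (cs.drop (i + 1)).any pvIsDig = true := by
        rw [List.drop_eq_getElem_cons h, List.any_cons, hdf, Bool.false_or] at hany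
        exact hany
      have hrec := pvSkipA_eq cs (i + 1) h hany'
      rw [pvSkipA, dif_pos h, if_neg hd, hrec]
      simp only [List.takeWhile_cons, hdf, Bool.not_false, if_true, List.length_cons]
      omega
  · exfalso
    have : i = cs.length := by omega
    simp [this] at hany
termination_by cs.length - i

-- A's accumulation loop folds over the maximal digit run and stops right after it
theorem pvAccA_eq (cs : List Char) (i : Nat) (r : Int) (hle : i ≤ cs.length) :
    pvAccA cs i r =
      (((cs.drop i).takeWhile pvIsDig).foldl (fun a c => a * 10 + ((c.toNat : Int) - 48)) r,
       i + ((cs.drop i).takeWhile pvIsDig).length) := by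
  by_cases h : i < cs.length
  · rw [List.drop_eq_getElem_cons h]
    by_cases hd : pvIsDig cs[i] = true
    · have hrec := pvAccA_eq cs (i + 1) (r * 10 + ((cs[i].toNat : Int) - 48)) h
      rw [pvAccA, dif_pos h, if_pos hd, hrec]
      simp only [List.takeWhile_cons, hd, if_true, List.foldl_cons, List.length_cons,
        Prod.mk.injEq]
      exact ⟨trivial, by omega⟩
    · have hdf : pvIsDig cs[i] = false := by simpa using hd
      rw [pvAccA, dif_pos h, if_neg hd]
      simp only [List.takeWhile_cons, hdf, Bool.false_eq_true, if_false, List.foldl_nil,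
        List.length_nil, Nat.add_zero]
  · have : i = cs.length := by omega
    rw [pvAccA, dif_neg h]
    simp [this]
termination_by cs.length - i

theorem takeWhile_length_le {α : Type} (p : α → Bool) (l : List α) :
    (l.takeWhile p).length ≤ l.length :=
  (List.takeWhile_sublist p).length_le

-- ===== VERDICT (by name: the statement is the Claim_ definition above) =====
theorem NextDecimalNumber_spec : Claim_equal_NextDecimalNumber := by
  intro s _ hpre
  unfold Spec_NextDecimalNumber NextDecimalNumber NextDecimalNumber_alt
  have hany0 : (s.toList.drop 0).any pvIsDig = true := by rw [List.drop_zero]; exact hpre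
  have hskip := pvSkipA_eq s.toList 0 (Nat.zero_le _) hany0
  simp only [List.drop_zero, Nat.zero_add] at hskip
  have hjle : (s.toList.takeWhile (fun c => !pvIsDig c)).length ≤ s.toList.length :=
    takeWhile_length_le _ _
  have hacc := pvAccA_eq s.toList (s.toList.takeWhile (fun c => !pvIsDig c)).length 0 hjle
  simp only [hskip, hacc, Prod.mk.injEq]
  refine ⟨trivial, ?_⟩
  rw [List.drop_drop, List.drop_drop]
  congr 2
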